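-- pv_equiv track=rewrite | github.com/X75JB/Avent_of_code_2023_3 | Day Three.py | sum_of_part_numbers
-- ===== SOURCE A (Python) =====
-- def is_valid_coordinate(x, y, rows, cols):
--     return 0 <= x < rows and 0 <= y < cols
--
-- def get_adjacent_numbers(engine_schematic, x, y):
--     rows, cols = len(engine_schematic), len(engine_schematic[0])
--     directions = [(dx, dy) for dx in range(-1, 2) for dy in range(-1, 2)]
--
--     adjacent_numbers = []
--     for dx, dy in directions:
--         new_x, new_y = x + dx, y + dy
--         if is_valid_coordinate(new_x, new_y, rows, cols):
--             current_char = engine_schematic[new_x][new_y]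
--             if current_char.isdigit():
--                 adjacent_numbers.append(int(current_char))
--
--     return adjacent_numbers
--
-- def sum_of_part_numbers(engine_schematic):
--     part_numbers_sum = 0
--
--     for i in range(len(engine_schematic)):
--         for j in range(len(engine_schematic[i])):
--             current_char = engine_schematic[i][j]
--             if current_char.isdigit():
--                 adjacent_numbers = get_adjacent_numbers(engine_schematic, i, j)
--                 part_numbers_sum += sum(adjacent_numbers)
--
--     return part_numbers_sum
-- ===== SOURCE B (Python) =====
-- def _row_prefix(row, cols):
--     # prefix sums of digit values over row[:cols] (the neighbor-eligible columns)
--     p = [0]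
--     for ch in row[:cols]:
--         p.append(p[-1] + (int(ch) if ch.isdigit() else 0))
--     return p
--
-- def sum_of_part_numbers(engine_schematic):
--     if not engine_schematic:
--         return 0
--     rows = len(engine_schematic)
--     cols = len(engine_schematic[0])
--     pref = [_row_prefix(row, cols) for row in engine_schematic]
--     total = 0
--     for i, row in enumerate(engine_schematic):
--         for j, ch in enumerate(row):
--             if ch.isdigit():
--                 lo = max(j - 1, 0)
--                 for x in range(max(i - 1, 0), min(i + 2, rows)):
--                     p = pref[x]
--                     L = len(p) - 1
--                     a = min(lo, L)
--                     b = min(j + 2, L)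
--                     total += p[b] - p[a]
--     return total
-- ===== Notes on version B (the rewrite author's own statement) =====
-- stated objective: alternative
-- what changed: B replaces A's per-digit 9-cell neighbour scan (with a per-cell validity test and digit test) by per-row prefix sums of digit values built once over the neighbour-eligible columns, so each digit cell's 3x3 neighbour sum is read as three O(1) prefix differences.
import Mathlib
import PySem

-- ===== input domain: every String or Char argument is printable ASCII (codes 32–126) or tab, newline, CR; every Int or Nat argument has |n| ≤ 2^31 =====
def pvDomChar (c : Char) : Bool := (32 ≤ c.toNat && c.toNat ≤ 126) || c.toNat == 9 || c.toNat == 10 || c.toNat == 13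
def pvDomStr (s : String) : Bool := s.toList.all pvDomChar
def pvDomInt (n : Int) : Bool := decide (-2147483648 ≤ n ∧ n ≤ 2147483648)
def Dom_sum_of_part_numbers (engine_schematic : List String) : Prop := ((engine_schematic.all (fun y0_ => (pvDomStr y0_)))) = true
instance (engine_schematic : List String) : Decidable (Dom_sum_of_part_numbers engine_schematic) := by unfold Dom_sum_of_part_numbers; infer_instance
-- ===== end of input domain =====

-- B replaces A's 9-cell neighbour scan per digit by per-row prefix sums of digit values,
-- reading each 3-wide window segment as one prefix difference (objective: alternative).

-- ===== PORT A =====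
def is_valid_coordinate (x y rows cols : Int) : Bool :=
  decide (0 ≤ x ∧ x < rows ∧ 0 ≤ y ∧ y < cols)

def get_adjacent_numbers (engine_schematic : List String) (x y : Int) : List Int :=
  let rows := PySem.List.len engine_schematic
  let cols := PySem.Str.len (PySem.List.pyGetD engine_schematic 0 "")
  let directions := (PySem.List.pyRange (-1) 2 1).flatMap
    (fun dx => (PySem.List.pyRange (-1) 2 1).map (fun dy => (dx, dy)))
  directions.foldl (fun adjacent_numbers d =>
    let new_x := x + d.1
    let new_y := y + d.2
    if is_valid_coordinate new_x new_y rows cols then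
      match PySem.Str.pyGet? (PySem.List.pyGetD engine_schematic new_x "") new_y with
      | some current_char =>                       -- none = IndexError, excluded by Pre_
        if PySem.Chars.isdigit current_char then
          adjacent_numbers ++ [(current_char.toNat : Int) - 48]   -- int(c) for an ASCII digit char
        else adjacent_numbers
      | none => adjacent_numbers
    else adjacent_numbers) []

def sum_of_part_numbers (engine_schematic : List String) : Int :=
  (PySem.List.pyRange 0 (PySem.List.len engine_schematic) 1).foldl (fun part_numbers_sum i =>
    let row := PySem.List.pyGetD engine_schematic i ""
    (PySem.List.pyRange 0 (PySem.Str.len row) 1).foldl (fun s j =>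
      match PySem.Str.pyGet? row j with
      | some current_char =>
        if PySem.Chars.isdigit current_char then
          s + (get_adjacent_numbers engine_schematic i j).sum
        else s
      | none => s) part_numbers_sum) 0

-- ===== PORT B =====
-- prefix sums of digit values over row[:cols] (the neighbour-eligible columns)
def pvRowPrefix (row : String) (cols : Int) : List Int :=
  (PySem.Str.slice row none (some cols)).toList.foldl
    (fun p ch =>
      p ++ [PySem.List.pyGetD p (-1) 0 +
        (if PySem.Chars.isdigit ch then (ch.toNat : Int) - 48 else 0)]) [0]

def sum_of_part_numbers_alt (engine_schematic : List String) : Int :=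
  if engine_schematic = [] then 0 else
  let rows := PySem.List.len engine_schematic
  let cols := PySem.Str.len (PySem.List.pyGetD engine_schematic 0 "")
  let pref := engine_schematic.map (fun row => pvRowPrefix row cols)
  (PySem.List.enumerate engine_schematic).foldl (fun total iz =>
    (PySem.List.enumerate iz.2.toList).foldl (fun total2 jc =>
      if PySem.Chars.isdigit jc.2 then
        let lo := max (jc.1 - 1) 0
        (PySem.List.pyRange (max (iz.1 - 1) 0) (min (iz.1 + 2) rows) 1).foldl
          (fun t x =>
            let p := PySem.List.pyGetD pref x []
            let L := PySem.List.len p - 1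
            let a := min lo L
            let b := min (jc.1 + 2) L
            t + (PySem.List.pyGetD p b 0 - PySem.List.pyGetD p a 0)) total2
      else total2) total) 0

-- ===== PRECONDITION & SPEC =====
-- Pre_ excludes exactly the inputs where A raises IndexError: a digit cell with a 3x3-window
-- position that passes A's column test (taken from row 0's width) but lies beyond that row's
-- own length.  On every input A returns on, Pre_ holds.
def Pre_sum_of_part_numbers (engine_schematic : List String) : Prop :=
  ((List.range engine_schematic.length).all (fun i =>
    (List.range ((engine_schematic.getD i "").toList).length).all (fun j =>
      !(PySem.Chars.isdigit (((engine_schematic.getD i "").toList).getD j ' ')) ||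
      (List.range engine_schematic.length).all (fun x =>
        (List.range ((engine_schematic.getD 0 "").toList).length).all (fun y =>
          !(decide (i ≤ x + 1 ∧ x ≤ i + 1 ∧ j ≤ y + 1 ∧ y ≤ j + 1)) ||
          decide (y < ((engine_schematic.getD x "").toList).length)))))) = true
instance (engine_schematic : List String) : Decidable (Pre_sum_of_part_numbers engine_schematic) := by
  unfold Pre_sum_of_part_numbers; infer_instance
def pvWitness_sum_of_part_numbers : List String := (["1*2", ".3."])

def Spec_sum_of_part_numbers (engine_schematic : List String) (out : Int) : Prop := out = sum_of_part_numbers_alt engine_schematic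
instance (engine_schematic : List String) (out : Int) : Decidable (Spec_sum_of_part_numbers engine_schematic out) := by unfold Spec_sum_of_part_numbers; infer_instance

-- ===== CLAIM (what is proved, stated in full; the proofs are below) =====
def Claim_equal_sum_of_part_numbers : Prop := ∀ (engine_schematic : List String), Dom_sum_of_part_numbers engine_schematic → Pre_sum_of_part_numbers engine_schematic → Spec_sum_of_part_numbers engine_schematic (sum_of_part_numbers engine_schematic)

-- ===== LEMMAS AND PROOFS =====

-- digit value of a char (0 for non-digits)
def pvDval (c : Char) : Int := if PySem.Chars.isdigit c then (c.toNat : Int) - 48 else 0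
-- row x as a list of chars ("" beyond the grid)
def pvRow (g : List String) (x : Nat) : List Char := (g.getD x "").toList
def pvRows (g : List String) : Int := (g.length : Int)
def pvCols (g : List String) : Int := ((pvRow g 0).length : Int)
-- value at (x, y), 0 when out of the grid / beyond the row
def pvW (g : List String) (x y : Int) : Int :=
  if 0 ≤ x ∧ 0 ≤ y then ((pvRow g x.toNat)[y.toNat]?.elim 0 pvDval) else 0
-- A's per-direction contribution (0 outside A's validity test)
def pvAC (g : List String) (x y : Int) : Int :=
  if 0 ≤ x ∧ x < pvRows g ∧ 0 ≤ y ∧ y < pvCols g then pvW g x y else 0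
def pvDirs : List (Int × Int) :=
  [(-1,-1),(-1,0),(-1,1),(0,-1),(0,0),(0,1),(1,-1),(1,0),(1,1)]
def pvAdjSum (g : List String) (x y : Int) : Int :=
  (pvDirs.map (fun d => pvAC g (x + d.1) (y + d.2))).sum
def pvS (l : List Char) : Int := (l.map pvDval).sum
-- B's inner x-loop, abstracted
def pvSegB (g : List String) (I J : Int) : Int :=
  ((PySem.List.pyRange (max (I - 1) 0) (min (I + 2) (PySem.List.len g)) 1).map
    (fun x =>
      let p := PySem.List.pyGetD
        (g.map (fun row => pvRowPrefix row (PySem.Str.len (PySem.List.pyGetD g 0 "")))) x []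
      let L := PySem.List.len p - 1
      let a := min (max (J - 1) 0) L
      let b := min (J + 2) L
      PySem.List.pyGetD p b 0 - PySem.List.pyGetD p a 0)).sum
def pvBody (g : List String) (f : Nat → Nat → Int) : Int :=
  ((List.range g.length).map (fun i =>
    ((List.range (pvRow g i).length).map (fun j =>
      if PySem.Chars.isdigit ((pvRow g i).getD j ' ') then f i j else 0)).sum)).sum

def pvOptL (g : List String) (x y : Int) (d : Int × Int) : List Int :=
  if is_valid_coordinate (x + d.1) (y + d.2) (PySem.List.len g)
      (PySem.Str.len (PySem.List.pyGetD g 0 "")) then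
    match PySem.Str.pyGet? (PySem.List.pyGetD g (x + d.1) "") (y + d.2) with
    | some c => if PySem.Chars.isdigit c then [(c.toNat : Int) - 48] else []
    | none => []
  else []

theorem pvSum_flatMap (l : List (Int × Int)) (f : Int × Int → List Int) :
    (l.flatMap f).sum = (l.map (fun d => (f d).sum)).sum := by
  induction l with
  | nil => rfl
  | cons a t ih => simp [List.flatMap_cons, ih]

theorem pvA_adj_list (g : List String) (x y : Int) :
    get_adjacent_numbers g x y = pvDirs.flatMap (pvOptL g x y) := by
  unfold get_adjacent_numbers
  rw [show (PySem.List.pyRange (-1) 2 1).flatMap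
      (fun dx => (PySem.List.pyRange (-1) 2 1).map (fun dy => (dx, dy))) = pvDirs from by decide]
  rw [PySem.List.foldl_congr_mem pvDirs _ (fun acc d => acc ++ pvOptL g x y d) []
    (by
      intro acc d _
      unfold pvOptL
      simp only [PySem.List.len_eq, PySem.Str.len_eq]
      by_cases hv : is_valid_coordinate (x + d.1) (y + d.2) ((g.length : Int))
          ((((PySem.List.pyGetD g 0 "").toList.length : Nat) : Int)) = true
      swap
      · rw [Bool.not_eq_true] at hv
        simp only [hv, Bool.false_eq_true, if_false, List.append_nil]
      · simp only [hv, if_true]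
        cases hc : PySem.Str.pyGet? (PySem.List.pyGetD g (x + d.1) "") (y + d.2) with
        | none => simp
        | some c =>
          by_cases hdig : PySem.Chars.isdigit c = true
          · simp [hdig]
          · rw [Bool.not_eq_true] at hdig; simp [hdig])]
  exact PySem.List.foldl_append_eq_flatMap _ _ []

theorem pvOptL_sum (g : List String) (x y : Int) (d : Int × Int) :
    (pvOptL g x y d).sum = pvAC g (x + d.1) (y + d.2) := by
  unfold pvOptL pvAC pvW pvRows pvCols pvRow is_valid_coordinate
  simp only [PySem.List.len_eq, PySem.Str.len_eq, decide_eq_true_eq, PySem.List.pyGetD_zero]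
  by_cases hv : 0 ≤ x + d.1 ∧ x + d.1 < (g.length : Int) ∧ 0 ≤ y + d.2 ∧
      y + d.2 < ((((g.getD 0 "").toList).length : Nat) : Int)
  · rw [if_pos hv, if_pos hv, if_pos ⟨hv.1, hv.2.2.1⟩]
    rw [PySem.List.pyGetD_of_nonneg _ _ hv.1]
    rw [PySem.Str.pyGet?_eq, PySem.Chars.pyGet?_eq_listPyGet?,
        PySem.List.pyGet?_of_nonneg _ hv.2.2.1]
    cases hc : ((g.getD (x + d.1).toNat "").toList)[(y + d.2).toNat]? with
    | none => simp
    | some c =>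
      by_cases hdig : PySem.Chars.isdigit c = true
      · simp [pvDval, hdig]
      · rw [Bool.not_eq_true] at hdig; simp [pvDval, hdig]
  · rw [if_neg hv, if_neg hv]; rfl

theorem pvA_adj (g : List String) (x y : Int) :
    (get_adjacent_numbers g x y).sum = pvAdjSum g x y := by
  rw [pvA_adj_list, pvSum_flatMap, pvAdjSum]
  exact congrArg _ (List.map_congr_left (fun d _ => pvOptL_sum g x y d))

theorem pvA_char (g : List String) :
    sum_of_part_numbers g = pvBody g (fun i j => pvAdjSum g i j) := by
  unfold sum_of_part_numbers pvBody
  rw [PySem.List.pyRange_one]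
  simp only [PySem.List.len_eq, Int.sub_zero, Int.toNat_natCast, List.foldl_map, zero_add, pvRow]
  rw [PySem.List.foldl_congr_mem _ _
      (fun (s : Int) (i : Nat) =>
        s + ((List.range ((g.getD i "").toList).length).map
          (fun j => if PySem.Chars.isdigit (((g.getD i "").toList).getD j ' ') = true
            then pvAdjSum g ↑i ↑j else 0)).sum) 0
      ?_]
  · rw [PySem.List.foldl_add, zero_add]
  · intro s i _
    simp only [PySem.List.pyGetD_natCast, PySem.Str.len_eq, PySem.List.pyRange_one,
      Int.sub_zero, Int.toNat_natCast, List.foldl_map, zero_add]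
    rw [PySem.List.foldl_congr_mem _ _
        (fun (s2 : Int) (j : Nat) =>
          s2 + (if PySem.Chars.isdigit (((g.getD i "").toList).getD j ' ') = true
            then pvAdjSum g ↑i ↑j else 0)) s
        ?_]
    · rw [PySem.List.foldl_add]
    · intro s2 j hj
      rw [List.mem_range] at hj
      rw [PySem.Str.pyGet?_eq, PySem.Chars.pyGet?_eq_listPyGet?, PySem.List.pyGet?_natCast,
          List.getElem?_eq_getElem hj]
      beta_reduce
      rw [List.getD_eq_getElem _ ' ' hj]
      by_cases hdig : PySem.Chars.isdigit (((g[i]?.getD "").toList)[j]'(by simpa [List.getD_eq_getElem?_getD] using hj)) = true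
      · simp [hdig, pvA_adj]
      · rw [Bool.not_eq_true] at hdig
        simp [hdig]

theorem pvXloop (g : List String) (I J t : Int) :
    (PySem.List.pyRange (max (I - 1) 0) (min (I + 2) (PySem.List.len g)) 1).foldl
      (fun t x =>
        let p := PySem.List.pyGetD
          (g.map (fun row => pvRowPrefix row (PySem.Str.len (PySem.List.pyGetD g 0 "")))) x []
        let L := PySem.List.len p - 1
        let a := min (max (J - 1) 0) L
        let b := min (J + 2) L
        t + (PySem.List.pyGetD p b 0 - PySem.List.pyGetD p a 0)) t = t + pvSegB g I J := by
  unfold pvSegB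
  rw [PySem.List.foldl_add]

theorem pvB_char (g : List String) :
    sum_of_part_numbers_alt g = pvBody g (fun i j => pvSegB g ↑i ↑j) := by
  unfold sum_of_part_numbers_alt pvBody
  by_cases hg : g = []
  · subst hg; simp
  · rw [if_neg hg]
    rw [PySem.List.foldl_congr_mem _ _
        (fun (total : Int) (iz : Int × String) =>
          total + ((PySem.List.enumerate iz.2.toList).map
            (fun jc => if PySem.Chars.isdigit jc.2 = true then pvSegB g iz.1 jc.1 else 0)).sum) 0
        ?_]
    · rw [PySem.List.foldl_add, zero_add]
      rw [PySem.List.enumerate_eq_map_pyRange g "", PySem.List.pyRange_one]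
      simp only [PySem.List.len_eq, Int.sub_zero, Int.toNat_natCast, List.map_map,
        Function.comp_def, zero_add, PySem.List.pyGetD_natCast, pvRow]
      refine congrArg _ (List.map_congr_left ?_)
      intro i _
      rw [PySem.List.enumerate_eq_map_pyRange _ ' ', PySem.List.pyRange_one]
      simp only [PySem.List.len_eq, Int.sub_zero, Int.toNat_natCast, List.map_map,
        Function.comp_def, zero_add, PySem.List.pyGetD_natCast]
    · intro total iz _
      rw [PySem.List.foldl_congr_mem _ _
          (fun (t2 : Int) (jc : Int × Char) =>
            t2 + (if PySem.Chars.isdigit jc.2 = true then pvSegB g iz.1 jc.1 else 0)) total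
          ?_]
      · rw [PySem.List.foldl_add]
      · intro t2 jc _
        by_cases hdig : PySem.Chars.isdigit jc.2 = true
        · simp only [hdig, if_true]
          exact pvXloop g iz.1 jc.1 t2
        · rw [Bool.not_eq_true] at hdig
          simp only [hdig, Bool.false_eq_true, if_false, add_zero]

theorem pvPre_spec (g : List String) (h : Pre_sum_of_part_numbers g) :
    ∀ i < g.length, ∀ j < (pvRow g i).length,
      PySem.Chars.isdigit ((pvRow g i).getD j ' ') = true →
      ∀ x < g.length, ∀ y < (pvRow g 0).length,
        (i ≤ x + 1 ∧ x ≤ i + 1 ∧ j ≤ y + 1 ∧ y ≤ j + 1) →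
        y < (pvRow g x).length := by
  unfold Pre_sum_of_part_numbers at h
  simp only [List.all_eq_true, List.mem_range, Bool.or_eq_true,
    decide_eq_true_eq, Bool.not_eq_eq_eq_not, Bool.not_true] at h
  intro i hi j hj hd x hx y hy hrel
  rcases h i hi j hj with h1 | h1
  · rw [pvRow] at hd; rw [hd] at h1; cases h1
  · rcases h1 x hx y hy with h2 | h2
    · rw [decide_eq_false_iff_not] at h2; exact absurd hrel h2
    · exact h2

def pvPfx (u : List Char) : List Int :=
  (List.range (u.length + 1)).map (fun k => pvS (u.take k))

theorem pvFoldStep (u : List Char) : ∀ (p : List Int) (hp : p ≠ []),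
    u.foldl (fun p ch =>
      p ++ [PySem.List.pyGetD p (-1) 0 +
        (if PySem.Chars.isdigit ch then (ch.toNat : Int) - 48 else 0)]) p
    = p ++ (List.range u.length).map (fun k => p.getLast hp + pvS (u.take (k+1))) := by
  induction u with
  | nil => intro p hp; simp
  | cons c u ih =>
    intro p hp
    rw [List.foldl_cons, PySem.List.pyGetD_neg_one p 0 hp,
      ih (p ++ [p.getLast hp + (if PySem.Chars.isdigit c then (c.toNat : Int) - 48 else 0)]) (by simp)]
    rw [List.getLast_concat]
    simp only [List.length_cons]
    rw [List.range_succ_eq_map, List.map_cons, List.map_map]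
    rw [List.append_assoc, List.singleton_append]
    refine congrArg _ ?_
    refine congrArg₂ _ ?_ (List.map_congr_left ?_)
    · simp [pvS, pvDval]
    · intro k _
      simp only [Function.comp_def, List.take_succ_cons, pvS, List.map_cons, List.sum_cons, pvDval]
      ring

theorem pvRowPrefix_eq (row : String) (c : Int) (hc : 0 ≤ c) :
    pvRowPrefix row c = pvPfx (row.toList.take c.toNat) := by
  unfold pvRowPrefix pvPfx
  rw [show (PySem.Str.slice row none (some c)).toList = row.toList.take c.toNat from by
    simp [PySem.Str.slice, PySem.List.slice_to _ hc]]
  rw [pvFoldStep _ [0] (by simp)]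
  rw [List.range_succ_eq_map, List.map_cons, List.map_map, List.singleton_append]
  refine congrArg₂ _ (by simp [pvS]) (List.map_congr_left ?_)
  intro k _
  simp

theorem pvPfx_getD (u : List Char) (k : Nat) (hk : k ≤ u.length) :
    (pvPfx u).getD k 0 = pvS (u.take k) := by
  unfold pvPfx
  exact PySem.List.getD_map_range _ _ _ _ (by omega)

theorem pvSeg_eq (u : List Char) (a b : Nat) (hb : b ≤ u.length) :
    pvS ((u.drop a).take (b - a)) =
      ((List.range' a (b - a)).map (fun y => pvDval (u.getD y ' '))).sum := by
  have hlist : (u.drop a).take (b - a) = (List.range' a (b - a)).map (fun y => u.getD y ' ') := by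
    apply List.ext_getElem
    · simp [List.length_range']; omega
    · intro n h1 h2
      simp only [List.getElem_take, List.getElem_drop, List.getElem_map, List.getElem_range']
      rw [List.getD_eq_getElem _ _ (by simp at h1 ⊢; omega)]
      congr 1
      omega
  rw [pvS, hlist, List.map_map]
  simp [Function.comp_def]

def pvT (g : List String) (x : Nat) : List Char := (pvRow g x).take (pvRow g 0).length
def pvG (g : List String) (j x : Nat) : Int :=
  pvS (((pvT g x).drop (min (j-1) (pvT g x).length)).take
       (min (j+2) (pvT g x).length - min (j-1) (pvT g x).length))

theorem pvMid (g : List String) (i j : Nat) :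
    pvSegB g ↑i ↑j =
      ((List.range (min (i+2) g.length - (i-1))).map (fun k => pvG g j (i-1+k))).sum := by
  unfold pvSegB
  rw [PySem.List.len_eq,
      show (max ((i:Int) - 1) 0) = (((i-1 : Nat) : Nat) : Int) from by omega,
      show (min ((i:Int) + 2) ((g.length : Nat) : Int)) = ((min (i+2) g.length : Nat) : Int) from by omega,
      PySem.List.pyRange_one]
  simp only [List.map_map]
  rw [show ((((min (i+2) g.length) : Nat) : Int) - (((i-1) : Nat) : Int)).toNat
      = min (i+2) g.length - (i-1) from by omega]
  refine congrArg _ (List.map_congr_left ?_)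
  intro k hk
  rw [List.mem_range] at hk
  simp only [Function.comp_def]
  rw [show (((i-1 : Nat) : Int) + (k : Int)) = (((i-1+k) : Nat) : Int) from by push_cast; ring]
  have hxlt : i-1+k < g.length := by omega
  rw [PySem.List.pyGetD_natCast]
  rw [List.getD_eq_getElem _ _ (by simpa using hxlt), List.getElem_map]
  rw [show g[i-1+k]'hxlt = g.getD (i-1+k) "" from (List.getD_eq_getElem _ _ hxlt).symm]
  rw [PySem.List.pyGetD_zero, PySem.Str.len_eq]
  rw [pvRowPrefix_eq _ _ (by positivity), Int.toNat_natCast]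
  have hT : (g.getD (i-1+k) "").toList.take ((g.getD 0 "").toList.length) = pvT g (i-1+k) := by
    unfold pvT pvRow; rfl
  rw [hT]
  have hplen : (pvPfx (pvT g (i-1+k))).length = (pvT g (i-1+k)).length + 1 := by
    simp [pvPfx]
  rw [PySem.List.len_eq, hplen]
  rw [show (((pvT g (i-1+k)).length + 1 : Nat) : Int) - 1 = (((pvT g (i-1+k)).length : Nat) : Int) from by omega]
  rw [show (min (max ((j:Int) - 1) 0) (((pvT g (i-1+k)).length : Nat) : Int))
      = ((min (j-1) (pvT g (i-1+k)).length : Nat) : Int) from by omega]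
  rw [show (min ((j:Int) + 2) (((pvT g (i-1+k)).length : Nat) : Int))
      = ((min (j+2) (pvT g (i-1+k)).length : Nat) : Int) from by omega]
  rw [PySem.List.pyGetD_natCast, PySem.List.pyGetD_natCast]
  rw [pvPfx_getD _ _ (by omega), pvPfx_getD _ _ (by omega)]
  unfold pvG
  have hab : min (j+2) (pvT g (i-1+k)).length
      = min (j-1) (pvT g (i-1+k)).length + (min (j+2) (pvT g (i-1+k)).length - min (j-1) (pvT g (i-1+k)).length) := by
    omega
  rw [hab, List.take_add]
  simp [pvS]

def pvR3 (g : List String) (j : Nat) (X : Int) : Int :=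
  pvAC g X ((j : Int) - 1) + pvAC g X (j : Int) + pvAC g X ((j : Int) + 1)

theorem pvRowEq (g : List String) (i j x : Nat)
    (hPre : Pre_sum_of_part_numbers g) (hi : i < g.length)
    (hj : j < (pvRow g i).length)
    (hd : PySem.Chars.isdigit ((pvRow g i).getD j ' ') = true)
    (hx : x < g.length) (hx1 : i ≤ x + 1) (hx2 : x ≤ i + 1) :
    pvG g j x = pvR3 g j ↑x := by
  have key : ∀ y : Nat, j ≤ y + 1 → y ≤ j + 1 → y < (pvRow g 0).length →
      y < (pvRow g x).length :=
    fun y h1 h2 hy => pvPre_spec g hPre i hi j hj hd x hx y hy ⟨hx1, hx2, h1, h2⟩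
  have hu : (pvT g x).length = min (pvRow g 0).length (pvRow g x).length := by
    simp [pvT]
  have hkey2 : ∀ y : Nat, j ≤ y + 1 → y ≤ j + 1 → y < (pvRow g 0).length →
      y < (pvT g x).length := by
    intro y h1 h2 hy
    have := key y h1 h2 hy
    omega
  have hAC : ∀ y : Nat, j ≤ y + 1 → y ≤ j + 1 →
      pvAC g ↑x ↑y = if y < (pvRow g 0).length then pvDval ((pvT g x).getD y ' ') else 0 := by
    intro y h1 h2
    unfold pvAC pvW pvRows pvCols
    by_cases hyc : y < (pvRow g 0).length
    · have hyu : y < (pvT g x).length := hkey2 y h1 h2 hyc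
      have hyrow : y < (pvRow g x).length := by omega
      rw [if_pos ⟨by positivity, by exact_mod_cast hx, by positivity, by exact_mod_cast hyc⟩]
      rw [if_pos ⟨by positivity, by positivity⟩]
      simp only [Int.toNat_natCast]
      rw [List.getElem?_eq_getElem hyrow]
      simp only [Option.elim_some]
      rw [if_pos hyc]
      rw [List.getD_eq_getElem _ _ hyu]
      simp [pvT, List.getElem_take]
    · rw [if_neg, if_neg hyc]
      intro h
      exact hyc (by exact_mod_cast h.2.2.2)
  have hzero1 : j = 0 → pvAC g ↑x ((j : Int) - 1) = 0 := by
    intro h0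
    subst h0
    unfold pvAC
    rw [if_neg]
    intro h
    omega
  -- left side as an interval sum
  have hseg : pvG g j x =
      ((List.range' (min (j-1) (pvT g x).length)
        (min (j+2) (pvT g x).length - min (j-1) (pvT g x).length)).map
        (fun y => pvDval ((pvT g x).getD y ' '))).sum := by
    unfold pvG
    exact pvSeg_eq _ _ _ (by omega)
  rw [hseg]
  unfold pvR3
  by_cases hc1 : (pvRow g 0).length + 1 ≤ j
  · -- the whole window is right of the eligible columns: both sides are 0
    have hj1 : 1 ≤ j := by omega
    rw [show ((j : Int) - 1) = ((j-1 : Nat) : Int) from by omega,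
        show ((j : Int) + 1) = ((j+1 : Nat) : Int) from by push_cast; ring]
    rw [hAC (j-1) (by omega) (by omega), hAC j (by omega) (by omega),
        hAC (j+1) (by omega) (by omega)]
    rw [if_neg (by omega), if_neg (by omega), if_neg (by omega)]
    rw [show min (j+2) (pvT g x).length - min (j-1) (pvT g x).length = 0 from by omega]
    simp
  · have hc2 : j ≤ (pvRow g 0).length := by omega
    by_cases hc0 : (pvRow g 0).length = 0
    · -- no eligible columns at all (row 0 is empty); j = 0
      have hj0 : j = 0 := by omega
      subst hj0
      rw [hzero1 rfl]
      rw [show ((0 : Nat) : Int) = ((0 : Nat) : Int) from rfl]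
      rw [hAC 0 (by omega) (by omega),
          show ((0 : Nat) : Int) + 1 = ((1 : Nat) : Int) from by norm_num,
          hAC 1 (by omega) (by omega)]
      rw [if_neg (by omega), if_neg (by omega)]
      rw [show min (0+2) (pvT g x).length - min (0-1) (pvT g x).length = 0 from by omega]
      simp
    · -- the window meets the eligible columns
      have hbU : min (j+2) (pvRow g 0).length ≤ (pvT g x).length := by
        have := hkey2 (min (j+2) (pvRow g 0).length - 1) (by omega) (by omega) (by omega)
        omega
      have haN : min (j-1) (pvT g x).length = j-1 := by omega
      have hbN : min (j+2) (pvT g x).length = min (j+2) (pvRow g 0).length := by omega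
      rw [haN, hbN]
      by_cases hj0 : j = 0
      · subst hj0
        rw [hzero1 rfl]
        rw [hAC 0 (by omega) (by omega),
            show ((0 : Nat) : Int) + 1 = ((1 : Nat) : Int) from by norm_num,
            hAC 1 (by omega) (by omega)]
        rcases (by omega : (pvRow g 0).length = 1 ∨ 2 ≤ (pvRow g 0).length) with h1 | h2
        · rw [show min (0+2) (pvRow g 0).length - (0-1) = 1 from by omega]
          rw [if_pos (by omega), if_neg (by omega)]
          simp [List.range']
        · rw [show min (0+2) (pvRow g 0).length - (0-1) = 2 from by omega]
          rw [if_pos (by omega), if_pos (by omega)]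
          simp [List.range']
      · have hj1 : 1 ≤ j := by omega
        rw [show ((j : Int) - 1) = ((j-1 : Nat) : Int) from by omega,
            show ((j : Int) + 1) = ((j+1 : Nat) : Int) from by push_cast; ring]
        rw [hAC (j-1) (by omega) (by omega), hAC j (by omega) (by omega),
            hAC (j+1) (by omega) (by omega)]
        rcases (by omega : (pvRow g 0).length = j ∨ (pvRow g 0).length = j+1 ∨
            j+2 ≤ (pvRow g 0).length) with h1 | h1 | h1
        · rw [show min (j+2) (pvRow g 0).length - (j-1) = 1 from by omega]
          rw [if_pos (by omega), if_neg (by omega), if_neg (by omega)]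
          simp [List.range']
        · rw [show min (j+2) (pvRow g 0).length - (j-1) = 2 from by omega]
          rw [if_pos (by omega), if_pos (by omega), if_neg (by omega)]
          simp [List.range', show j - 1 + 1 = j from by omega]
        · rw [show min (j+2) (pvRow g 0).length - (j-1) = 3 from by omega]
          rw [if_pos (by omega), if_pos (by omega), if_pos (by omega)]
          simp [List.range']
          rw [show j - 1 + 1 = j from by omega]
          ring

theorem pvAdj_group (g : List String) (i j : Nat) :
    pvAdjSum g ↑i ↑j = pvR3 g j ((i : Int) - 1) + pvR3 g j (i : Int) + pvR3 g j ((i : Int) + 1) := by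
  unfold pvAdjSum pvDirs pvR3
  simp only [List.map_cons, List.map_nil, List.sum_cons, List.sum_nil, ← sub_eq_add_neg, add_zero]
  ring

theorem pvR3_zero (g : List String) (j : Nat) (X : Int)
    (hX : X < 0 ∨ (g.length : Int) ≤ X) : pvR3 g j X = 0 := by
  unfold pvR3 pvAC pvRows
  rw [if_neg (by intro h; omega), if_neg (by intro h; omega), if_neg (by intro h; omega)]
  simp

theorem pvCore (g : List String) (i j : Nat)
    (hPre : Pre_sum_of_part_numbers g) (hi : i < g.length)
    (hj : j < (pvRow g i).length)
    (hd : PySem.Chars.isdigit ((pvRow g i).getD j ' ') = true) :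
    pvSegB g i j = pvAdjSum g i j := by
  rw [pvMid, pvAdj_group]
  have hrow := fun x hx hx1 hx2 => pvRowEq g i j x hPre hi hj hd hx hx1 hx2
  rcases Nat.eq_zero_or_pos i with hi0 | hipos
  · subst hi0
    rw [pvR3_zero g j (((0:Nat) : Int) - 1) (by omega)]
    rcases (by omega : g.length = 1 ∨ 2 ≤ g.length) with h1 | h2
    · rw [show min (0+2) g.length - (0-1) = 1 from by omega]
      simp only [List.range_succ, List.range_zero, List.map_cons, List.map_nil,
        List.sum_cons, List.sum_nil, List.nil_append]
      rw [hrow (0-1+0) (by omega) (by omega) (by omega)]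
      rw [pvR3_zero g j (((0:Nat) : Int) + 1) (by omega)]
      norm_num
    · rw [show min (0+2) g.length - (0-1) = 2 from by omega]
      simp only [List.range_succ, List.range_zero, List.map_cons, List.map_nil,
        List.sum_cons, List.sum_nil, List.nil_append, List.map_append, List.sum_append]
      rw [hrow (0-1+0) (by omega) (by omega) (by omega),
          hrow (0-1+1) (by omega) (by omega) (by omega)]
      rw [show (((0-1+0 : Nat)) : Int) = ((0:Nat) : Int) from by norm_num,
          show (((0-1+1 : Nat)) : Int) = ((0:Nat) : Int) + 1 from by norm_num]
      norm_num
  · rcases (by omega : g.length = i+1 ∨ i+2 ≤ g.length) with h1 | h2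
    · rw [show min (i+2) g.length - (i-1) = 2 from by omega]
      simp only [List.range_succ, List.range_zero, List.map_cons, List.map_nil,
        List.sum_cons, List.sum_nil, List.nil_append, List.map_append, List.sum_append]
      rw [hrow (i-1+0) (by omega) (by omega) (by omega),
          hrow (i-1+1) (by omega) (by omega) (by omega)]
      rw [show (((i-1+0 : Nat)) : Int) = ((i:Nat) : Int) - 1 from by omega,
          show (((i-1+1 : Nat)) : Int) = ((i:Nat) : Int) from by omega]
      rw [pvR3_zero g j (((i:Nat) : Int) + 1) (by omega)]
      ring
    · rw [show min (i+2) g.length - (i-1) = 3 from by omega]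
      simp only [List.range_succ, List.range_zero, List.map_cons, List.map_nil,
        List.sum_cons, List.sum_nil, List.nil_append, List.map_append, List.sum_append]
      rw [hrow (i-1+0) (by omega) (by omega) (by omega),
          hrow (i-1+1) (by omega) (by omega) (by omega),
          hrow (i-1+2) (by omega) (by omega) (by omega)]
      rw [show (((i-1+0 : Nat)) : Int) = ((i:Nat) : Int) - 1 from by omega,
          show (((i-1+1 : Nat)) : Int) = ((i:Nat) : Int) from by omega,
          show (((i-1+2 : Nat)) : Int) = ((i:Nat) : Int) + 1 from by omega]
      ring

-- ===== VERDICT (by name: the statement is the Claim_ definition above) =====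
theorem sum_of_part_numbers_spec : Claim_equal_sum_of_part_numbers := by
  intro g _ hPre
  unfold Spec_sum_of_part_numbers
  rw [pvA_char, pvB_char]
  unfold pvBody
  refine congrArg _ (List.map_congr_left ?_)
  intro i hi
  refine congrArg _ (List.map_congr_left ?_)
  intro j hj
  rw [List.mem_range] at hi hj
  by_cases hd : PySem.Chars.isdigit ((pvRow g i).getD j ' ') = true
  · simp only [hd, if_true]
    exact (pvCore g i j hPre hi hj hd).symm
  · rw [Bool.not_eq_true] at hd
    rw [List.getD_eq_getElem?_getD] at hd
    simp [hd]
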